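-- pv_equiv track=rewrite | github.com/Habiburr0hman/number-theory | 05. Tetrahedral Numbers.py | tetrahedral_number
-- ===== SOURCE A (Python) =====
-- def tetrahedral_number(n):
--     arr = []
--     num = 0
--     for i in range(1, n+1):
--         for j in range(1, i+1):
--             num += j
--         arr.append(num)
--     return arr, num
-- ===== SOURCE B (Python) =====
-- def tetrahedral_number(n):
--     arr = []
--     tri = 0
--     tet = 0
--     for i in range(1, n + 1):
--         tri += i
--         tet += tri
--         arr.append(tet)
--     return arr, tet
-- ===== Notes on version B (the rewrite author's own statement) =====
-- stated objective: faster
-- what changed: Replaces the quadratic nested loop (re-summing 1..i for every i) with a single pass keeping running triangular and tetrahedral accumulators.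
import Mathlib
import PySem

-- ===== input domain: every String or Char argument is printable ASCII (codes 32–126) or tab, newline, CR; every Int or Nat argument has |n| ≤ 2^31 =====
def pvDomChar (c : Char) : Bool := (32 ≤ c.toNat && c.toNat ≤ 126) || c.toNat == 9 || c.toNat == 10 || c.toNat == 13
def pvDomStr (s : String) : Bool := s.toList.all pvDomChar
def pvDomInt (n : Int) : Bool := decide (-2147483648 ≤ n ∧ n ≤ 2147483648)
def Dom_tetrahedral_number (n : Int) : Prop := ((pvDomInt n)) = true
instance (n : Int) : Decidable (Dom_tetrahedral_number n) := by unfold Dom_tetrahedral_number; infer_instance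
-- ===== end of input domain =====

-- B replaces A's quadratic nested re-summation by one linear pass with running triangular/tetrahedral accumulators.

-- ===== PORT A =====
def tetrahedral_number (n : Int) : List Int × Int :=
  (PySem.List.pyRange 1 (n + 1) 1).foldl
    (fun (st : List Int × Int) i =>
      let num := (PySem.List.pyRange 1 (i + 1) 1).foldl (fun s j => s + j) st.2
      (st.1 ++ [num], num))
    ([], 0)

-- ===== PORT B =====
def tetrahedral_number_alt (n : Int) : List Int × Int :=
  let st := (PySem.List.pyRange 1 (n + 1) 1).foldl
    (fun (st : List Int × (Int × Int)) i =>
      let tri := st.2.1 + i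
      let tet := st.2.2 + tri
      (st.1 ++ [tet], tri, tet))
    ([], 0, 0)
  (st.1, st.2.2)

-- ===== PRECONDITION & SPEC =====
def Spec_tetrahedral_number (n : Int) (out : List Int × Int) : Prop := out = tetrahedral_number_alt n
instance (n : Int) (out : List Int × Int) : Decidable (Spec_tetrahedral_number n out) := by unfold Spec_tetrahedral_number; infer_instance

-- ===== CLAIM (what is proved, stated in full; the proofs are below) =====
def Claim_equal_tetrahedral_number : Prop := ∀ (n : Int), Dom_tetrahedral_number n → Spec_tetrahedral_number n (tetrahedral_number n)

-- ===== LEMMAS AND PROOFS =====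

-- A's inner loop from a running start is the start plus the triangular sum.
theorem pvInnerSum (i : Int) (s : Int) :
    (PySem.List.pyRange 1 (i + 1) 1).foldl (fun s j => s + j) s
      = s + ((PySem.List.pyRange 1 (i + 1) 1).map id).sum := by
  simpa using PySem.List.foldl_add (PySem.List.pyRange 1 (i + 1) 1) id s

-- Joint loop invariant over range(1, m+1): same list, same final num, and B's tri is the m-th triangular number.
theorem loops_eq (m : Nat) :
    ((PySem.List.pyRange 1 ((m : Int) + 1) 1).foldl
        (fun (st : List Int × Int) i =>
          let num := (PySem.List.pyRange 1 (i + 1) 1).foldl (fun s j => s + j) st.2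
          (st.1 ++ [num], num)) ([], 0)
      = (fun st : List Int × (Int × Int) => (st.1, st.2.2))
          ((PySem.List.pyRange 1 ((m : Int) + 1) 1).foldl
            (fun (st : List Int × (Int × Int)) i =>
              let tri := st.2.1 + i
              let tet := st.2.2 + tri
              (st.1 ++ [tet], tri, tet)) ([], 0, 0)))
    ∧ ((PySem.List.pyRange 1 ((m : Int) + 1) 1).foldl
          (fun (st : List Int × (Int × Int)) i =>
            let tri := st.2.1 + i
            let tet := st.2.2 + tri
            (st.1 ++ [tet], tri, tet)) ([], 0, 0)).2.1
        = ((PySem.List.pyRange 1 ((m : Int) + 1) 1).map id).sum := by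
  induction m with
  | zero => simp [PySem.List.pyRange_one_eq_nil]
  | succ k ih =>
    push_cast
    have hsplit : PySem.List.pyRange 1 ((k : Int) + 1 + 1) 1
        = PySem.List.pyRange 1 ((k : Int) + 1) 1 ++ [(k : Int) + 1] := by
      have := PySem.List.pyRange_one_succ_right (a := 1) (b := (k : Int) + 1) (by omega)
      simpa using this
    obtain ⟨ih1, ih2⟩ := ih
    constructor
    · rw [hsplit]
      simp only [List.foldl_append, List.foldl_cons, List.foldl_nil]
      rw [ih1, pvInnerSum]
      simp [ih2]
      rw [hsplit]
      simp
    · rw [hsplit]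
      simp only [List.foldl_append, List.foldl_cons, List.foldl_nil,
        List.map_append, List.sum_append]
      simp [ih2]

-- ===== VERDICT (by name: the statement is the Claim_ definition above) =====
theorem tetrahedral_number_spec : Claim_equal_tetrahedral_number := by
  intro n _
  unfold Spec_tetrahedral_number tetrahedral_number tetrahedral_number_alt
  rcases (by omega : n ≤ 0 ∨ 0 < n) with h | h
  · rw [PySem.List.pyRange_one_eq_nil (by omega)]
    simp
  · have hn : n = ((n.toNat : Int)) := by omega
    rw [hn]
    exact (loops_eq n.toNat).1
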